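-- pv_equiv track=rewrite | github.com/btyu/SAGA | modules/shared/analyzer/basic_analyzer/basic_analyzer.py | _adjust_markdown_heading_levels
-- ===== SOURCE A (Python) =====
-- def _adjust_markdown_heading_levels(text: str, increase_by: int = 1) -> str:
--     """
--     Adjust markdown heading levels by adding additional # symbols.
--
--     Args:
--         text: Markdown text to adjust
--         increase_by: Number of levels to increase (default: 1)
--
--     Returns:
--         Adjusted markdown text with increased heading levels
--
--     Example:
--         "# Title" with increase_by=2 becomes "### Title"
--         "## Section" with increase_by=2 becomes "#### Section"
--     """
--     if increase_by <= 0: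
--         return text
--
--     lines = text.split('\n')
--     adjusted_lines = []
--
--     for line in lines:
--         # Check if line starts with markdown heading (one or more #)
--         if line.strip().startswith('#'):
--             # Count leading #'s
--             stripped = line.lstrip()
--             hash_count = 0
--             for char in stripped:
--                 if char == '#':
--                     hash_count += 1
--                 else:
--                     break
--
--             # Add additional #'s and keep the rest of the line
--             if hash_count > 0 and hash_count < len(stripped):
--                 # Ensure we don't exceed markdown's heading limit (h6 = ######)
--                 new_hash_count = min(hash_count + increase_by, 6)
--                 new_hashes = '#' * new_hash_count
--                 rest_of_line = stripped[hash_count:]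
--                 # Preserve original leading whitespace
--                 leading_space = line[:len(line) - len(line.lstrip())]
--                 adjusted_lines.append(f"{leading_space}{new_hashes}{rest_of_line}")
--             else:
--                 adjusted_lines.append(line)
--         else:
--             adjusted_lines.append(line)
--
--     return '\n'.join(adjusted_lines)
-- ===== SOURCE B (Python) =====
-- def _adjust_markdown_heading_levels(text: str, increase_by: int = 1) -> str:
--     """Same result as A, computed by a single index-based scan over the raw
--     character stream: at each line start it spans the indent and the '#' run in
--     place and splices in the capped hash run, never splitting the text into a
--     line list or joining one back."""
--     if increase_by <= 0:
--         return text
--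
--     out = []
--     i, n = 0, len(text)
--     while i < n:
--         # i is at the start of a line: span indent, then the '#' run
--         j = i
--         while j < n and text[j] != '\n' and text[j].isspace():
--             j += 1
--         k = j
--         while k < n and text[k] == '#':
--             k += 1
--         if k > j and k < n and text[k] != '\n':
--             # heading with content: emit indent + capped hash run, resume after it
--             out.append(text[i:j])
--             out.append('#' * min(k - j + increase_by, 6))
--             i = k
--         # copy the remainder of the line (including its newline, if any)
--         e = text.find('\n', i)
--         if e == -1:
--             out.append(text[i:])
--             i = n
--         else:
--             out.append(text[i:e + 1])
--             i = e + 1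
--     return ''.join(out)
-- ===== Notes on version B (the rewrite author's own statement) =====
-- stated objective: alternative
-- what changed: Replaces A's three-stage pipeline (split into a line list, per-line loop with a manual hash-counting inner loop, join back) by a single index-based scan over the raw character stream that spans the indent and the hash run in place and splices in the capped hash run, never materialising a line list.
import Mathlib
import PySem

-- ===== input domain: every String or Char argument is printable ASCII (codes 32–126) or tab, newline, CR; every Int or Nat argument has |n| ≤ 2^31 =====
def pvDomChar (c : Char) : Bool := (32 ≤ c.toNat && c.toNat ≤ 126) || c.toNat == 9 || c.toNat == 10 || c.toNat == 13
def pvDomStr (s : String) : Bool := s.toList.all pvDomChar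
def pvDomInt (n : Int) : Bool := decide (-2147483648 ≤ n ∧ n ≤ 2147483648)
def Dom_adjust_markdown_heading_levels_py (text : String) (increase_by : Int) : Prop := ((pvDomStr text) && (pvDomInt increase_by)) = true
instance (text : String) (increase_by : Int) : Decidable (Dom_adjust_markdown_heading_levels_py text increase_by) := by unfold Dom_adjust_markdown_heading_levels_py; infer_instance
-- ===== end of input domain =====

-- B replaces A's split-into-lines / per-line loop / join pipeline by a single index-based
-- scan over the raw character stream that splices the capped hash runs in place;
-- return values are equal.

-- ===== PORT A =====
-- the inner 'for char in stripped: if char == '#': hash_count += 1 else: break' loop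
def pvCountHashesA : List Char → Nat
  | [] => 0
  | c :: cs => if c = '#' then pvCountHashesA cs + 1 else 0

-- the body of A's 'for line in lines' loop
def pvAdjLineA (increase_by : Int) (line : List Char) : List Char :=
  if PySem.Chars.startswith (PySem.Chars.strip line) ['#'] then
    let stripped := PySem.Chars.lstrip line
    let hash_count := pvCountHashesA stripped
    if hash_count > 0 ∧ hash_count < stripped.length then
      let new_hash_count := min ((hash_count : Int) + increase_by) 6
      let new_hashes := List.replicate new_hash_count.toNat '#'
      let rest_of_line := PySem.List.slice stripped (some (hash_count : Int)) none
      let leading_space := PySem.List.slice line none (some ((line.length : Int) - ((PySem.Chars.lstrip line).length : Int)))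
      leading_space ++ new_hashes ++ rest_of_line
    else line
  else line

def adjust_markdown_heading_levels_py (text : String) (increase_by : Int) : String :=
  if increase_by ≤ 0 then text
  else
    let lines := PySem.Chars.splitOn text.toList ['\n']
    let adjusted_lines := lines.foldl (fun acc line => acc ++ [pvAdjLineA increase_by line]) []
    String.ofList (PySem.Chars.join ['\n'] adjusted_lines)

-- ===== PORT B =====
-- Source B's 'while j < n and text[j] != '\n' and text[j].isspace()' predicate
def pvWsB (c : Char) : Bool := c ≠ '\n' && PySem.Chars.isspace c

-- Source B's 'e = text.find('\n', i)' + copy of text[i:e+1] (or text[i:] when absent):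
-- (rest of the line including its newline if any, remainder after it)
def pvNotNL (c : Char) : Bool := c ≠ '\n'

def pvLineB (l : List Char) : List Char × List Char :=
  match l.dropWhile pvNotNL with
  | [] => (l.takeWhile pvNotNL, [])
  | c :: cs => (l.takeWhile pvNotNL ++ [c], cs)

-- termination fact for the scan: copying a line consumes at least one character
theorem pvLineB_snd_lt (l : List Char) (h : l ≠ []) : (pvLineB l).2.length < l.length := by
  unfold pvLineB
  cases hd : l.dropWhile pvNotNL with
  | nil =>
    simpa [List.length_pos_iff] using h
  | cons c cs =>
    have hlen : (l.takeWhile pvNotNL).length + (c :: cs).length = l.length := by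
      have := congrArg List.length (List.takeWhile_append_dropWhile (p := pvNotNL) (l := l))
      rw [hd] at this
      simpa [List.length_append] using this
    simp only [List.length_cons] at hlen
    simp
    omega

-- Source B's 'k < n and text[k] != '\n'' test
def pvHeadNotNL (l : List Char) : Bool :=
  match l.head? with
  | some c => c ≠ '\n'
  | none => false

theorem pvHeadNotNL_ne_nil {l : List Char} (h : pvHeadNotNL l = true) : l ≠ [] := by
  intro hn
  rw [hn] at h
  simp [pvHeadNotNL] at h

-- Source B's main 'while i < n' loop: one iteration per line, in place on the stream
def pvScanB (increase_by : Int) (s : List Char) : List Char :=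
  if hnil : s = [] then []
  else
    let ws := s.takeWhile pvWsB
    let r1 := s.dropWhile pvWsB
    let hs := r1.takeWhile (fun c => c = '#')
    let r2 := r1.dropWhile (fun c => c = '#')
    if h : hs ≠ [] ∧ pvHeadNotNL r2 then
      ws ++ List.replicate (min ((hs.length : Int) + increase_by) 6).toNat '#'
        ++ (pvLineB r2).1 ++ pvScanB increase_by (pvLineB r2).2
    else
      (pvLineB s).1 ++ pvScanB increase_by (pvLineB s).2
termination_by s.length
decreasing_by
  · have hr2 : (s.dropWhile pvWsB).dropWhile (fun c => c = '#') ≠ [] :=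
      pvHeadNotNL_ne_nil h.2
    calc (pvLineB ((s.dropWhile pvWsB).dropWhile (fun c => c = '#'))).2.length
        < ((s.dropWhile pvWsB).dropWhile (fun c => c = '#')).length := pvLineB_snd_lt _ hr2
      _ ≤ (s.dropWhile pvWsB).length := List.length_dropWhile_le _ _
      _ ≤ s.length := List.length_dropWhile_le _ _
  · exact pvLineB_snd_lt _ hnil

def adjust_markdown_heading_levels_py_alt (text : String) (increase_by : Int) : String :=
  if increase_by ≤ 0 then text
  else String.ofList (pvScanB increase_by text.toList)

-- ===== PRECONDITION & SPEC =====
def Spec_adjust_markdown_heading_levels_py (text : String) (increase_by : Int) (out : String) : Prop := out = adjust_markdown_heading_levels_py_alt text increase_by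
instance (text : String) (increase_by : Int) (out : String) : Decidable (Spec_adjust_markdown_heading_levels_py text increase_by out) := by unfold Spec_adjust_markdown_heading_levels_py; infer_instance

-- ===== CLAIM (what is proved, stated in full; the proofs are below) =====
def Claim_equal_adjust_markdown_heading_levels_py : Prop := ∀ (text : String) (increase_by : Int), Dom_adjust_markdown_heading_levels_py text increase_by → Spec_adjust_markdown_heading_levels_py text increase_by (adjust_markdown_heading_levels_py text increase_by)

-- ===== LEMMAS AND PROOFS =====

-- proof-side description of what one scan iteration does to a single line
def pvAdjLineB (increase_by : Int) (line : List Char) : List Char :=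
  let body := PySem.Chars.lstrip line
  let rest := body.dropWhile (· = '#')
  let hashes := body.length - rest.length
  if 0 < hashes ∧ rest ≠ [] then
    PySem.List.slice line none (some ((line.length : Int) - (body.length : Int)))
      ++ List.replicate (min ((hashes : Int) + increase_by) 6).toNat '#' ++ rest
  else line

theorem pvCountHashesA_eq_takeWhile (cs : List Char) :
    pvCountHashesA cs = (cs.takeWhile (· = '#')).length := by
  induction cs with
  | nil => rfl
  | cons c cs ih =>
    simp only [pvCountHashesA, List.takeWhile]
    by_cases h : c = '#' <;> simp [h, ih]

theorem pvDropWhileHeadFalse {α : Type} (p : α → Bool) (l : List α) (c : α) (cs : List α)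
    (h : l.dropWhile p = c :: cs) : p c = false := by
  induction l with
  | nil => simp at h
  | cons a l ih =>
    rw [List.dropWhile_cons] at h
    by_cases pa : p a
    · exact ih (by simpa [pa] using h)
    · simp only [pa] at h
      cases h
      simpa using pa

theorem pvDropWhileEqDrop {α : Type} (p : α → Bool) (l : List α) :
    l.dropWhile p = l.drop (l.takeWhile p).length := by
  induction l with
  | nil => rfl
  | cons a l ih =>
    rw [List.dropWhile_cons, List.takeWhile_cons]
    by_cases pa : p a <;> simp [pa, ih]

theorem pvRstripCons (c : Char) (cs : List Char) (h : PySem.Chars.isspace c = false) :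
    PySem.Chars.rstrip (c :: cs) = c :: PySem.Chars.rstrip cs := by
  unfold PySem.Chars.rstrip
  rw [List.reverse_cons, List.dropWhile_append]
  split_ifs with h2
  · simp only [List.isEmpty_iff] at h2
    simp [h2, List.dropWhile, h]
  · simp

-- A's per-line body equals the proof-side line transform
theorem pvAdjLine_eq (increase_by : Int) (line : List Char) :
    pvAdjLineA increase_by line = pvAdjLineB increase_by line := by
  have hsub : (PySem.Chars.lstrip line).length ≤ line.length :=
    List.length_dropWhile_le _ _
  unfold pvAdjLineA pvAdjLineB PySem.Chars.strip
  dsimp only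
  cases hb : PySem.Chars.lstrip line with
  | nil => simp [PySem.Chars.rstrip, PySem.Chars.startswith]
  | cons c cs =>
    rw [hb] at hsub
    have hc : PySem.Chars.isspace c = false :=
      pvDropWhileHeadFalse PySem.Chars.isspace line c cs hb
    rw [pvRstripCons c cs hc]
    by_cases hch : c = '#'
    · subst hch
      have hstart : PySem.Chars.startswith ('#' :: PySem.Chars.rstrip cs) ['#'] = true := by
        simp [PySem.Chars.startswith, List.isPrefixOf]
      rw [hstart, if_pos rfl]
      have htd : cs.takeWhile (· = '#') ++ cs.dropWhile (· = '#') = cs :=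
        List.takeWhile_append_dropWhile
      have hlen : (cs.takeWhile (· = '#')).length + (cs.dropWhile (· = '#')).length = cs.length := by
        have h := congrArg List.length htd
        rw [List.length_append] at h
        exact h
      have hcount : pvCountHashesA ('#' :: cs) = (cs.takeWhile (· = '#')).length + 1 := by
        simp [pvCountHashesA, pvCountHashesA_eq_takeWhile]
      have hrest : ('#' :: cs).dropWhile (· = '#') = cs.dropWhile (· = '#') := by
        simp
      have hhashes : ('#' :: cs).length - (('#' :: cs).dropWhile (· = '#')).length
          = (cs.takeWhile (· = '#')).length + 1 := by
        rw [hrest]; simp only [List.length_cons]; omega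
      rw [hrest] at hhashes
      rw [hrest, hhashes, hcount]
      have hcond : ((cs.takeWhile (· = '#')).length + 1 > 0 ∧
          (cs.takeWhile (· = '#')).length + 1 < ('#' :: cs).length)
          ↔ (0 < (cs.takeWhile (· = '#')).length + 1 ∧ cs.dropWhile (· = '#') ≠ []) := by
         constructor
         · rintro ⟨h1, h2⟩
           refine ⟨h1, ?_⟩
           intro hnil
           have hd0 : (cs.dropWhile (· = '#')).length = 0 := by rw [hnil]; rfl
           simp only [List.length_cons] at h2
           omega
         · rintro ⟨h1, h2⟩
           refine ⟨h1, ?_⟩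
           simp only [List.length_cons]
           have : (cs.dropWhile (· = '#')).length ≠ 0 := by
             simpa [List.length_eq_zero_iff] using h2
           omega
      by_cases hcnd : 0 < (cs.takeWhile (· = '#')).length + 1 ∧ cs.dropWhile (· = '#') ≠ []
      · rw [if_pos (hcond.mpr hcnd), if_pos hcnd]
        have hdrop : PySem.List.slice ('#' :: cs)
            (some (((cs.takeWhile (· = '#')).length + 1 : Nat) : Int)) none
            = cs.dropWhile (· = '#') := by
          rw [PySem.List.slice_from _ (by positivity)]
          rw [pvDropWhileEqDrop (· = '#') cs]
          simp [List.drop_succ_cons]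
        rw [hdrop]
      · rw [if_neg (fun hh => hcnd (hcond.mp hh)), if_neg hcnd]
    · have hstart : PySem.Chars.startswith (c :: PySem.Chars.rstrip cs) ['#'] = false := by
        have hbeq : ('#' == c) = false := by
          simpa [beq_iff_eq] using fun h : '#' = c => hch h.symm
        simp [PySem.Chars.startswith, List.isPrefixOf, hbeq]
      rw [hstart]
      have hrest : (c :: cs).dropWhile (· = '#') = c :: cs := by
        simp [hch]
      rw [hrest]
      simp

theorem foldl_append_map {α β : Type} (f : α → β) (l : List α) (acc : List β) :
    l.foldl (fun acc x => acc ++ [f x]) acc = acc ++ l.map f := by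
  induction l generalizing acc with
  | nil => simp
  | cons x xs ih => simp [List.foldl, ih]

-- reference split: text.split('\n') as plain structural recursion
def nlSplit : List Char → List (List Char)
  | [] => [[]]
  | c :: cs =>
    if c = '\n' then [] :: nlSplit cs
    else
      match nlSplit cs with
      | [] => [[c]]
      | p :: ps => (c :: p) :: ps

theorem nlSplit_ne_nil (l : List Char) : nlSplit l ≠ [] := by
  cases l with
  | nil => simp [nlSplit]
  | cons c cs =>
    simp only [nlSplit]
    split_ifs
    · simp
    · cases nlSplit cs <;> simp

theorem nlSplit_no_nl (L : List Char) (h : '\n' ∉ L) : nlSplit L = [L] := by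
  induction L with
  | nil => rfl
  | cons c cs ih =>
    have hc : c ≠ '\n' := fun hh => h (hh ▸ List.mem_cons_self)
    have hcs := ih (fun hm => h (List.mem_cons_of_mem _ hm))
    simp [nlSplit, hc, hcs]

theorem nlSplit_append (L rest : List Char) (h : '\n' ∉ L) :
    nlSplit (L ++ '\n' :: rest) = L :: nlSplit rest := by
  induction L with
  | nil => simp [nlSplit]
  | cons c cs ih =>
    have hc : c ≠ '\n' := fun hh => h (hh ▸ List.mem_cons_self)
    have hcs := ih (fun hm => h (List.mem_cons_of_mem _ hm))
    simp [nlSplit, hc, hcs]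

-- splitOn with separator '\n' computes nlSplit
theorem splitOn_go_nl (l : List Char) : ∀ (fuel : Nat) (cur : List Char) (acc : List (List Char)),
    l.length ≤ fuel →
    PySem.Chars.splitOn.go ['\n'] fuel l cur acc
      = acc.reverse ++ (nlSplit l).modifyHead (cur.reverse ++ ·) := by
  induction l with
  | nil =>
    intro fuel cur acc _
    cases fuel <;> simp [PySem.Chars.splitOn.go, nlSplit]
  | cons c cs ih =>
    intro fuel cur acc hf
    cases fuel with
    | zero => simp at hf
    | succ fuel =>
      by_cases hc : c = '\n'
      · subst hc
        have : PySem.Chars.splitOn.go ['\n'] (fuel + 1) ('\n' :: cs) cur acc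
            = PySem.Chars.splitOn.go ['\n'] fuel cs [] (cur.reverse :: acc) := by
          simp [PySem.Chars.splitOn.go, List.isPrefixOf]
        rw [this, ih fuel [] (cur.reverse :: acc) (by simpa using Nat.lt_succ_iff.mp (by simpa using hf))]
        obtain ⟨p, ps, hps⟩ : ∃ p ps, nlSplit cs = p :: ps := by
          cases hq : nlSplit cs with
          | nil => exact absurd hq (nlSplit_ne_nil cs)
          | cons p ps => exact ⟨p, ps, rfl⟩
        simp [nlSplit, hps]
      · have : PySem.Chars.splitOn.go ['\n'] (fuel + 1) (c :: cs) cur acc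
            = PySem.Chars.splitOn.go ['\n'] fuel cs (c :: cur) acc := by
          have hbeq : ('\n' == c) = false := by
            simpa [beq_iff_eq] using fun h : '\n' = c => hc h.symm
          simp [PySem.Chars.splitOn.go, List.isPrefixOf, hbeq]
        rw [this, ih fuel (c :: cur) acc (by simpa using Nat.lt_succ_iff.mp (by simpa using hf))]
        obtain ⟨p, ps, hps⟩ : ∃ p ps, nlSplit cs = p :: ps := by
          cases hq : nlSplit cs with
          | nil => exact absurd hq (nlSplit_ne_nil cs)
          | cons p ps => exact ⟨p, ps, rfl⟩
        simp [nlSplit, hc, hps]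

theorem splitOn_eq_nlSplit (s : List Char) :
    PySem.Chars.splitOn s ['\n'] = nlSplit s := by
  unfold PySem.Chars.splitOn
  rw [splitOn_go_nl s (s.length + 1) [] [] (Nat.le_succ _)]
  obtain ⟨p, ps, hps⟩ : ∃ p ps, nlSplit s = p :: ps := by
    cases hq : nlSplit s with
    | nil => exact absurd hq (nlSplit_ne_nil s)
    | cons p ps => exact ⟨p, ps, rfl⟩
  simp [hps]

-- spans across an append whose second part starts with a failing character
theorem span_append_head {p : Char → Bool} (B tail : List Char)
    (h : ∀ c, tail.head? = some c → p c = false) :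
    (B ++ tail).takeWhile p = B.takeWhile p ∧ (B ++ tail).dropWhile p = B.dropWhile p ++ tail := by
  induction B with
  | nil =>
    cases tail with
    | nil => simp
    | cons c cs => simp [h c rfl]
  | cons b bs ih =>
    by_cases hb : p b <;>
      simp [hb, ih.1, ih.2]

theorem span_congr {p q : Char → Bool} (l : List Char) (h : ∀ c ∈ l, p c = q c) :
    l.takeWhile p = l.takeWhile q ∧ l.dropWhile p = l.dropWhile q := by
  induction l with
  | nil => simp
  | cons c cs ih =>
    have hc := h c List.mem_cons_self
    have ihs := ih (fun x hx => h x (List.mem_cons_of_mem _ hx))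
    by_cases hp : p c
    · simp [hp, hc ▸ hp, ihs.1, ihs.2]
    · have hq : q c = false := hc ▸ (Bool.not_eq_true _ ▸ by simpa using hp)
      simp [hp, hq]

theorem pvLineB_last (D : List Char) (hD : '\n' ∉ D) : pvLineB (D ++ []) = (D ++ [], []) := by
  have h1 : D.takeWhile pvNotNL = D :=
    List.takeWhile_eq_self_iff.mpr (fun c hc => by
      simp [pvNotNL]; intro hh; exact hD (hh ▸ hc))
  have h2 : D.dropWhile pvNotNL = [] :=
    List.dropWhile_eq_nil_iff.mpr (fun c hc => by
      simp [pvNotNL]; intro hh; exact hD (hh ▸ hc))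
  simp [pvLineB, h1, h2]

theorem pvLineB_step (D r : List Char) (hD : '\n' ∉ D) :
    pvLineB (D ++ '\n' :: r) = (D ++ ['\n'], r) := by
  have h1 : D.takeWhile pvNotNL = D :=
    List.takeWhile_eq_self_iff.mpr (fun c hc => by
      simp [pvNotNL]; intro hh; exact hD (hh ▸ hc))
  have h2 : D.dropWhile pvNotNL = [] :=
    List.dropWhile_eq_nil_iff.mpr (fun c hc => by
      simp [pvNotNL]; intro hh; exact hD (hh ▸ hc))
  have hspan := span_append_head (p := pvNotNL) D ('\n' :: r)
    (fun c hc => by simp at hc; subst hc; simp [pvNotNL])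
  simp only [pvLineB, hspan.1, hspan.2, h1, h2, List.nil_append]

-- one scan iteration over 'L ++ tail' ('\n'-free L, tail empty or starting with '\n')
-- produces the adjusted line followed by the scan of the remainder
theorem scan_line (inc : Int) (L tail nl rest : List Char)
    (hL : '\n' ∉ L) (ht : ∀ c, tail.head? = some c → c = '\n')
    (hnl : ∀ D, '\n' ∉ D → pvLineB (D ++ tail) = (D ++ nl, rest))
    (hne : L ++ tail ≠ []) :
    pvScanB inc (L ++ tail) = pvAdjLineB inc L ++ nl ++ pvScanB inc rest := by
  -- abbreviations for the four spans
  have hwsL : ∀ c ∈ L, pvWsB c = PySem.Chars.isspace c := by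
    intro c hc
    have : c ≠ '\n' := fun hh => hL (hh ▸ hc)
    simp [pvWsB, this]
  have hws := span_append_head (p := pvWsB) L tail
    (fun c hc => by rw [ht c hc]; simp [pvWsB])
  have hwsc := span_congr (p := pvWsB) (q := PySem.Chars.isspace) L hwsL
  have hBL : ∀ c ∈ L.dropWhile PySem.Chars.isspace, c ∈ L :=
    fun c hc => (List.dropWhile_sublist _).subset hc
  have hhs := span_append_head (p := fun c => c = '#') (L.dropWhile PySem.Chars.isspace) tail
    (fun c hc => by rw [ht c hc]; simp)
  -- names
  set W := L.takeWhile PySem.Chars.isspace with hW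
  set B := L.dropWhile PySem.Chars.isspace with hB
  set H := B.takeWhile (fun c => c = '#') with hH
  set D := B.dropWhile (fun c => c = '#') with hD
  have hDL : ∀ c ∈ D, c ∈ L := fun c hc => hBL c ((List.dropWhile_sublist _).subset hc)
  have hDnl : '\n' ∉ D := fun hm => hL (hDL _ hm)
  have hHD : H.length + D.length = B.length := by
    have h3 : H ++ D = B := List.takeWhile_append_dropWhile
    have := congrArg List.length h3
    rw [List.length_append] at this
    exact this
  have hWB : W ++ B = L := List.takeWhile_append_dropWhile
  have hWBlen : W.length + B.length = L.length := by
    have := congrArg List.length hWB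
    rw [List.length_append] at this
    exact this
  -- the scan's branch condition is B's per-line guard
  have hcond : ((H ≠ [] ∧ pvHeadNotNL (D ++ tail) = true) ↔ (H ≠ [] ∧ D ≠ [])) := by
    cases hDc : D with
    | nil =>
      cases htl : tail with
      | nil => simp [pvHeadNotNL]
      | cons c cs =>
        have : c = '\n' := ht c (by simp [htl])
        simp [pvHeadNotNL, this]
    | cons c cs =>
      have hcL : c ∈ L := hDL c (by simp [hDc])
      have : c ≠ '\n' := fun hh => hL (hh ▸ hcL)
      simp [pvHeadNotNL, this]
  -- unfold one iteration
  rw [pvScanB]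
  rw [dif_neg hne]
  simp only [hws.1, hws.2, hwsc.1, hwsc.2, hhs.1, hhs.2]
  by_cases hg : H ≠ [] ∧ D ≠ []
  · rw [dif_pos (hcond.mpr hg)]
    rw [hnl D hDnl]
    -- B-side line transform, guard true
    have hlstrip : PySem.Chars.lstrip L = B := rfl
    have hrest : B.dropWhile (· = '#') = D := rfl
    have hhashes : B.length - D.length = H.length := by omega
    have hguard : 0 < H.length ∧ D ≠ [] := ⟨List.length_pos_iff.mpr hg.1, hg.2⟩
    have hslice : PySem.List.slice L none (some ((L.length : Int) - (B.length : Int))) = W := by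
      rw [PySem.List.slice_to L (by omega)]
      have : ((L.length : Int) - (B.length : Int)).toNat = W.length := by omega
      rw [this, ← hWB, List.take_left]
    simp only [pvAdjLineB, hlstrip, hrest, hhashes]
    rw [if_pos hguard, hslice]
    simp [List.append_assoc]
  · rw [dif_neg (fun hh => hg (hcond.mp hh))]
    rw [hnl L hL]
    have hlstrip : PySem.Chars.lstrip L = B := rfl
    have hrest : B.dropWhile (· = '#') = D := rfl
    have hguard : ¬ (0 < B.length - D.length ∧ D ≠ []) := by
      intro hh
      refine hg ⟨?_, hh.2⟩
      have hHpos : 0 < H.length := by omega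
      exact List.length_pos_iff.mp hHpos
    simp only [pvAdjLineB, hlstrip, hrest]
    rw [if_neg hguard]

theorem scan_nil (inc : Int) : pvScanB inc [] = [] := by
  rw [pvScanB]
  simp

-- the whole scan computes join('\n', map(adjusted line, split('\n', s)))
theorem scan_eq (inc : Int) (s : List Char) :
    pvScanB inc s = PySem.Chars.join ['\n'] ((nlSplit s).map (pvAdjLineB inc)) := by
  cases hdw : s.dropWhile pvNotNL with
  | nil =>
    have hnoNl : '\n' ∉ s := by
      intro hm
      have := List.dropWhile_eq_nil_iff.mp hdw '\n' hm
      simp [pvNotNL] at this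

    by_cases hnil : s = []
    · subst hnil
      simp [pvScanB, nlSplit, PySem.Chars.join_singleton, pvAdjLineB, PySem.Chars.lstrip]
    · have := scan_line inc s [] [] [] hnoNl (by simp)
        (fun Dc hDc => by simpa using pvLineB_last Dc hDc) (by simpa using hnil)
      rw [nlSplit_no_nl s hnoNl]
      simp only [List.map_cons, List.map_nil, PySem.Chars.join_singleton]
      simpa [scan_nil] using this
  | cons c cs =>
    have hc : c = '\n' := by
      have := List.head?_dropWhile_not (p := pvNotNL) (l := s)
      rw [hdw, List.head?_cons] at this
      unfold pvNotNL at this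
      simpa using this
    subst hc
    have hL : '\n' ∉ s.takeWhile pvNotNL := by
      intro hm
      have := List.mem_takeWhile_imp hm
      simp [pvNotNL] at this
    have hsplit : s.takeWhile pvNotNL ++ '\n' :: cs = s := by
      have := List.takeWhile_append_dropWhile (p := pvNotNL) (l := s)
      rw [hdw] at this
      exact this
    have hstep := scan_line inc (s.takeWhile pvNotNL) ('\n' :: cs) ['\n'] cs hL
      (fun c hc => by simpa using hc.symm)
      (fun Dc hDc => pvLineB_step Dc cs hDc) (by simp)
    have hih := scan_eq inc cs
    rw [← hsplit, hstep, nlSplit_append _ _ hL, hih]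
    obtain ⟨p, ps, hps⟩ : ∃ p ps, nlSplit cs = p :: ps := by
      cases hq : nlSplit cs with
      | nil => exact absurd hq (nlSplit_ne_nil cs)
      | cons p ps => exact ⟨p, ps, rfl⟩
    rw [hps]
    simp [PySem.Chars.join_cons_cons]
termination_by s.length
decreasing_by
  have := congrArg List.length hsplit
  simp [List.length_append] at this
  omega

-- ===== VERDICT (by name: the statement is the Claim_ definition above) =====
theorem adjust_markdown_heading_levels_py_spec : Claim_equal_adjust_markdown_heading_levels_py := by
  intro text increase_by _
  unfold Spec_adjust_markdown_heading_levels_py adjust_markdown_heading_levels_py adjust_markdown_heading_levels_py_alt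
  by_cases h : increase_by ≤ 0
  · simp [h]
  · simp only [h, if_false]
    rw [foldl_append_map]
    rw [List.nil_append, splitOn_eq_nlSplit, scan_eq]
    rw [List.map_congr_left fun l _ => pvAdjLine_eq increase_by l]
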